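-- pv_equiv track=rewrite | github.com/AkiraTOSEI/KIAGO | comparison_methods/superdiff/evaluate.py | merge_sc_char
-- ===== SOURCE A (Python) =====
-- def merge_sc_char(split_sc_char: list[str]) -> list[str]:
--     """
--     Merge characters into list of useful element symbols and quantity numbers.
--
--     :param split_sc_char: Chemical formula split by character
--     """
--     split_sc = []
--     temp_numstr = ""
--     temp_alphastr = ""
--
--     for i in range(len(split_sc_char)):
--         if split_sc_char[i].isalpha() == True:
--             if temp_numstr != "":
--                 split_sc.append(temp_numstr)
--
--             temp_alphastr += split_sc_char[i]
--             temp_numstr = ""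
--         else:
--             if temp_alphastr != "":
--                 split_sc.append(temp_alphastr)
--             temp_alphastr = ""
--             temp_numstr += split_sc_char[i]
--
--     if temp_numstr != "":
--         split_sc.append(temp_numstr)
--
--     if temp_alphastr != "":
--         split_sc.append(temp_alphastr)
--
--     return split_sc
-- ===== SOURCE B (Python) =====
-- def merge_sc_char(split_sc_char: list[str]) -> list[str]:
--     """Run-based scan: consume each maximal run of same-isalpha() elements at once."""
--     out = []
--     n = len(split_sc_char)
--     i = 0
--     while i < n:
--         k = split_sc_char[i].isalpha()
--         j = i
--         while j < n and split_sc_char[j].isalpha() == k: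
--             j += 1
--         token = "".join(split_sc_char[i:j])
--         if token != "":
--             out.append(token)
--         i = j
--     return out
-- ===== Notes on version B (the rewrite author's own statement) =====
-- stated objective: simpler
-- what changed: Replaces the two-accumulator state machine (separate pending number/symbol strings flushed on each alpha/non-alpha switch and twice at the end) with a single run-based scan that joins each maximal run of same-isalpha elements and emits it if non-empty.
import Mathlib
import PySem

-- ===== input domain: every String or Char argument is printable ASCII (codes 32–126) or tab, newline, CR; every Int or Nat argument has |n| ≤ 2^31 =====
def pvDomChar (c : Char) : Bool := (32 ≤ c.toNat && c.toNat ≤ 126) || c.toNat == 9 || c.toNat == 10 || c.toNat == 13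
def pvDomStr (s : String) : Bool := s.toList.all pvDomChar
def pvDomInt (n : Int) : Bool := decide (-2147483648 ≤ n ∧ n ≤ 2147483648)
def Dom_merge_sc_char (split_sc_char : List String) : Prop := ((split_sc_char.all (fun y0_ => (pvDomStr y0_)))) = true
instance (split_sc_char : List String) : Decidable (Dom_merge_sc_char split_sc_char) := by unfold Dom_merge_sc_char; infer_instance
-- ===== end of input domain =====

-- B replaces A's two-accumulator state machine by a run-based scan (join each maximal
-- run of same-isalpha elements, emit if non-empty); objective: simpler.

-- ===== PORT A =====
-- A-side helpers: the loop body and the two end-of-loop flushes, as in the Python.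
def pvStepA (st : List String × String × String) (s : String) : List String × String × String :=
  let (split_sc, temp_numstr, temp_alphastr) := st
  if PySem.Str.strIsalpha s then
    ((if temp_numstr ≠ "" then split_sc ++ [temp_numstr] else split_sc), "", temp_alphastr ++ s)
  else
    ((if temp_alphastr ≠ "" then split_sc ++ [temp_alphastr] else split_sc), temp_numstr ++ s, "")

def pvFinishA (st : List String × String × String) : List String :=
  let (split_sc, temp_numstr, temp_alphastr) := st
  let r := if temp_numstr ≠ "" then split_sc ++ [temp_numstr] else split_sc
  if temp_alphastr ≠ "" then r ++ [temp_alphastr] else r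

def merge_sc_char (split_sc_char : List String) : List String :=
  pvFinishA (split_sc_char.foldl pvStepA ([], "", ""))

-- ===== PORT B =====
-- B's outer while-loop: each step consumes the maximal same-key run at the front
-- (B's inner `while j < n and ... == k: j += 1` scan = takeWhile/dropWhile) and
-- appends the joined token if non-empty.
def merge_sc_char_alt : List String → List String
  | [] => []
  | s :: rest =>
      let k := PySem.Str.strIsalpha s
      let run := List.takeWhile (fun t => PySem.Str.strIsalpha t == k) (s :: rest)
      let rest' := List.dropWhile (fun t => PySem.Str.strIsalpha t == k) (s :: rest)
      let token := PySem.Str.join "" run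
      (if token ≠ "" then [token] else []) ++ merge_sc_char_alt rest'
  termination_by l => l.length
  decreasing_by
    simp only [List.dropWhile_cons, beq_self_eq_true, if_true]
    exact Nat.lt_succ_of_le (List.length_dropWhile_le _ _)

-- ===== PRECONDITION & SPEC =====
def Spec_merge_sc_char (split_sc_char : List String) (out : List String) : Prop := out = merge_sc_char_alt split_sc_char
instance (split_sc_char : List String) (out : List String) : Decidable (Spec_merge_sc_char split_sc_char out) := by unfold Spec_merge_sc_char; infer_instance

-- ===== CLAIM (what is proved, stated in full; the proofs are below) =====
def Claim_equal_merge_sc_char : Prop := ∀ (split_sc_char : List String), Dom_merge_sc_char split_sc_char → Spec_merge_sc_char split_sc_char (merge_sc_char split_sc_char)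

-- ===== LEMMAS AND PROOFS =====

-- emit a token only if non-empty
def pvEmit (t : String) : List String := if t ≠ "" then [t] else []

-- A's state machine, rephrased element-wise with the accumulator made explicit
def pvPend (num alpha : String) : List String → List String
  | [] => pvEmit num ++ pvEmit alpha
  | s :: rest =>
      if PySem.Str.strIsalpha s then
        pvEmit num ++ pvPend "" (alpha ++ s) rest
      else
        pvEmit alpha ++ pvPend (num ++ s) "" rest

-- B's step with a pending prefix p of key k
def pvRunK (k : Bool) (p : String) (l : List String) : List String :=
  pvEmit (p ++ PySem.Str.join "" (List.takeWhile (fun t => PySem.Str.strIsalpha t == k) l))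
    ++ merge_sc_char_alt (List.dropWhile (fun t => PySem.Str.strIsalpha t == k) l)

theorem pvFoldA_eq_pvPend (l : List String) (acc : List String) (num alpha : String) :
    pvFinishA (l.foldl pvStepA (acc, num, alpha)) = acc ++ pvPend num alpha l := by
  induction l generalizing acc num alpha with
  | nil =>
      simp only [List.foldl_nil, pvFinishA, pvPend, pvEmit]
      split_ifs <;> simp
  | cons s rest ih =>
      simp only [List.foldl_cons, pvStepA, pvPend]
      by_cases h : PySem.Str.strIsalpha s = true
      · simp only [h, if_true, ih]
        by_cases hn : num = "" <;> simp [pvEmit, hn]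
      · simp only [eq_false_of_ne_true h, Bool.false_eq_true, if_false, ih]
        by_cases ha : alpha = "" <;> simp [pvEmit, ha]

theorem pvJoin_nil : PySem.Str.join "" ([] : List String) = "" := rfl

theorem pvJoin_cons (s : String) (l : List String) :
    PySem.Str.join "" (s :: l) = s ++ PySem.Str.join "" l := by
  cases l with
  | nil =>
      apply String.toList_injective
      simp [PySem.Str.toList_join, PySem.Chars.join_singleton, pvJoin_nil]
  | cons t r =>
      apply String.toList_injective
      simp [PySem.Str.toList_join, PySem.Chars.join_cons_cons]

theorem pvRunK_absorb (k : Bool) (p s : String) (rest : List String)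
    (h : PySem.Str.strIsalpha s = k) :
    pvRunK k p (s :: rest) = pvRunK k (p ++ s) rest := by
  simp only [PySem.Str.strIsalpha_eq] at h
  simp [pvRunK, h, pvJoin_cons,
    String.append_assoc]

theorem pvAlt_eq_pvRunK (s : String) (rest : List String) :
    merge_sc_char_alt (s :: rest) = pvRunK (PySem.Str.strIsalpha s) "" (s :: rest) := by
  rw [merge_sc_char_alt]
  simp [pvRunK, pvEmit]

theorem pvPend_eq_pvRunK (l : List String) :
    ∀ p : String, pvPend "" p l = pvRunK true p l ∧ pvPend p "" l = pvRunK false p l := by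
  induction l with
  | nil =>
      intro p
      constructor <;> simp [pvPend, pvRunK, pvEmit, merge_sc_char_alt, pvJoin_nil]
  | cons s rest ih =>
      intro p
      by_cases h : PySem.Str.strIsalpha s = true
      have hc := h
      simp only [PySem.Str.strIsalpha_eq] at hc
      · refine ⟨?_, ?_⟩
        · rw [pvPend, if_pos h, pvRunK_absorb true p s rest h]
          simpa [pvEmit] using (ih (p ++ s)).1
        · rw [pvPend, if_pos h]
          have hrun : pvRunK false p (s :: rest) = pvEmit p ++ merge_sc_char_alt (s :: rest) := by
            simp [pvRunK, hc, pvJoin_nil]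
          rw [hrun, pvAlt_eq_pvRunK s rest, h]
          have := (ih ("" ++ s)).1
          rw [pvRunK_absorb true "" s rest h]
          simpa using this
      · have h' : PySem.Str.strIsalpha s = false := eq_false_of_ne_true h
        refine ⟨?_, ?_⟩
        · rw [pvPend, if_neg h]
          have hc := h'
          simp only [PySem.Str.strIsalpha_eq] at hc
          have hrun : pvRunK true p (s :: rest) = pvEmit p ++ merge_sc_char_alt (s :: rest) := by
            simp [pvRunK, hc, pvJoin_nil]
          rw [hrun, pvAlt_eq_pvRunK s rest, h']
          have := (ih ("" ++ s)).2
          rw [pvRunK_absorb false "" s rest h']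
          simpa using this
        · rw [pvPend, if_neg h, pvRunK_absorb false p s rest h']
          simpa [pvEmit] using (ih (p ++ s)).2

-- ===== VERDICT (by name: the statement is the Claim_ definition above) =====
theorem merge_sc_char_spec : Claim_equal_merge_sc_char := by
  intro l _
  unfold Spec_merge_sc_char merge_sc_char
  rw [pvFoldA_eq_pvPend l [] "" "", List.nil_append]
  cases l with
  | nil => simp [pvPend, pvEmit, merge_sc_char_alt]
  | cons s rest =>
      rcases h : PySem.Str.strIsalpha s with _ | _
      · rw [(pvPend_eq_pvRunK (s :: rest) "").2, pvAlt_eq_pvRunK s rest, h]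
      · rw [(pvPend_eq_pvRunK (s :: rest) "").1, pvAlt_eq_pvRunK s rest, h]
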